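-- pv_equiv track=rewrite | github.com/rhyn0/AdventOfCode-Solvings | aoc_solvings/src_2022/day8.py | _traverse_c
-- ===== SOURCE A (Python) =====
-- def _traverse_c(col: int, data: list[list[int]]) -> set[tuple[int, int]]:
--     begin, end = 0, len(data) - 1
--     begin_prev, end_prev = -1, -1
--     ret_set = set()
--     while begin < end:
--         if data[begin][col] > begin_prev:
--             ret_set.add((begin, col))
--             begin_prev = data[begin][col]
--         if data[end][col] > end_prev:
--             ret_set.add((end, col))
--             end_prev = data[end][col]
--
--         if data[begin][col] >= data[end][col]:
--             end -= 1
--         else: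
--             begin += 1
--
--     return ret_set
-- ===== SOURCE B (Python) =====
-- def _traverse_c(col: int, data: list[list[int]]) -> set[tuple[int, int]]:
--     visible = set()
--     tallest = -1
--     for i in range(len(data)):
--         if data[i][col] > tallest:
--             visible.add((i, col))
--             tallest = data[i][col]
--     tallest = -1
--     for i in range(len(data) - 1, -1, -1):
--         if data[i][col] > tallest:
--             visible.add((i, col))
--             tallest = data[i][col]
--     return visible
-- ===== Notes on version B (the rewrite author's own statement) =====
-- stated objective: simpler
-- what changed: The interleaved two-pointer scan with coupled begin/end state is replaced by two independent directional sweeps (top-down then bottom-up, each keeping a single running maximum) whose union is the visible set; the single-row no-index corner of A's loop disappears.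
-- intended difference: On single-row grids (len(data)==1 with a valid col and height > -1) A returns set() although the lone tree stands on the grid edge and is visible, because its while-loop never runs; B returns {(0, col)}, the intended value for the AoC day-8 visibility task. — e.g. on _traverse_c(0, [[5]]): A returns [], B returns [(0, 0)]
-- outside the precondition, e.g. on _traverse_c(0, [[]]): A returns set(), B raises IndexError; on _traverse_c(2, [[5]]): A returns set(), B raises IndexError
import Mathlib
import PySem

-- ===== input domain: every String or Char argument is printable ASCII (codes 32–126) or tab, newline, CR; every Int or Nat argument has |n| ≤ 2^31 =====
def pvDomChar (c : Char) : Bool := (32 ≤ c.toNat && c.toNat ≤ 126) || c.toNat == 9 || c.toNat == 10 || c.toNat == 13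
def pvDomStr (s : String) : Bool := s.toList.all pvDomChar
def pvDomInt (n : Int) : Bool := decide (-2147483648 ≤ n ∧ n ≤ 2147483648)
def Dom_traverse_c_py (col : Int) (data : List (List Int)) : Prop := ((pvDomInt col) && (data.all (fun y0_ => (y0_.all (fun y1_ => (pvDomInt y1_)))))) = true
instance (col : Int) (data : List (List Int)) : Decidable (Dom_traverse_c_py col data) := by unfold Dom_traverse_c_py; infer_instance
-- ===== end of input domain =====

-- B replaces the interleaved two-pointer scan by two independent directional sweeps (top-down and
-- bottom-up running maxima); on single-row grids B marks the lone edge tree visible where A misses it (D_ below).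
-- Python returns an unordered set; both ports return it in canonical ascending-row order (compared as a finite set).


-- shared indexing helper: data[i][col] (Python indexing, total under Pre_ below)
def pvCell (col : Int) (data : List (List Int)) (i : Int) : Int :=
  PySem.List.pyGetD (PySem.List.pyGetD data i []) col 0

-- ===== PORT A =====
-- the while-loop of A: state (begin, end, begin_prev, end_prev, ret_set)
def tcLoopA (col : Int) (data : List (List Int)) : Nat → Int → Int → Int → Int →
    PySem.Set (Int × Int) → PySem.Set (Int × Int)
  | 0, _, _, _, _, ret => ret   -- fuel only makes the while-loop structural; it never runs out
  | fuel + 1, b, e, bp, ep, ret =>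
    if b < e then
      let hb := pvCell col data b
      let he := pvCell col data e
      let ret1 := if bp < hb then PySem.Set.add ret (b, col) else ret
      let bp1 := if bp < hb then hb else bp
      let ret2 := if ep < he then PySem.Set.add ret1 (e, col) else ret1
      let ep1 := if ep < he then he else ep
      if he ≤ hb then tcLoopA col data fuel b (e - 1) bp1 ep1 ret2
      else tcLoopA col data fuel (b + 1) e bp1 ep1 ret2
    else ret

def traverse_c_py (col : Int) (data : List (List Int)) : List (Int × Int) :=
  -- Python's set is unordered: returned in canonical ascending-row order (exact as a finite set)
  PySem.List.sorted (tcLoopA col data data.length 0 ((data.length : Int) - 1) (-1) (-1) PySem.Set.empty)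
    (fun x => x.1) false

-- ===== PORT B =====
-- one directional sweep: for i in the given index list, add (i, col) when data[i][col] > tallest
def sweepB (col : Int) (data : List (List Int)) (idxs : List Int)
    (st : PySem.Set (Int × Int) × Int) : PySem.Set (Int × Int) × Int :=
  idxs.foldl (fun st i =>
    if st.2 < pvCell col data i then (PySem.Set.add st.1 (i, col), pvCell col data i) else st) st

def traverse_c_py_alt (col : Int) (data : List (List Int)) : List (Int × Int) :=
  let s1 := (sweepB col data (PySem.List.pyRange 0 (data.length : Int) 1) (PySem.Set.empty, -1)).1
  let s2 := (sweepB col data (PySem.List.pyRange ((data.length : Int) - 1) (-1) (-1)) (s1, -1)).1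
  -- Python's set is unordered: returned in canonical ascending-row order (exact as a finite set)
  PySem.List.sorted s2 (fun x => x.1) false

-- ===== PRECONDITION & SPEC =====
-- Pre_ excludes inputs where some row's col index is out of range: there A raises IndexError as soon
-- as len(data) ≥ 2, and on the single-row instances A only returns set() because its loop never
-- indexes at all, while B (which reads every row) naturally raises.
def Pre_traverse_c_py (col : Int) (data : List (List Int)) : Prop :=
  (data.all fun row => decide (PySem.Raise.InRange row.length col)) = true
instance (col : Int) (data : List (List Int)) : Decidable (Pre_traverse_c_py col data) := by
  unfold Pre_traverse_c_py; infer_instance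

def pvWitness_traverse_c_py : Int × List (List Int) := (0, [[3], [1], [2]])

-- On single-row grids (len(data) = 1, col valid, height > -1) A returns the empty set although the
-- lone tree stands on the grid edge and is visible; B returns {(0, col)}, the intended value.
def D_traverse_c_py (col : Int) (data : List (List Int)) : Prop :=
  (data.length == 1 && decide (PySem.Raise.InRange (PySem.List.pyGetD data 0 []).length col)
    && decide (-1 < PySem.List.pyGetD (PySem.List.pyGetD data 0 []) col 0)) = true
instance (col : Int) (data : List (List Int)) : Decidable (D_traverse_c_py col data) := by
  unfold D_traverse_c_py; infer_instance

def Spec_traverse_c_py (col : Int) (data : List (List Int)) (out : List (Int × Int)) : Prop :=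
  ¬ D_traverse_c_py col data → out = traverse_c_py_alt col data
instance (col : Int) (data : List (List Int)) (out : List (Int × Int)) :
    Decidable (Spec_traverse_c_py col data out) := by unfold Spec_traverse_c_py; infer_instance

def pvDiffWitness_traverse_c_py : Int × List (List Int) := (0, [[5]])
def pvDiffWitnessOut_traverse_c_py : (List (Int × Int)) × (List (Int × Int)) := ([], [(0, 0)])

-- ===== CLAIM (what is proved, stated in full; the proofs are below) =====
def Claim_unchanged_traverse_c_py : Prop := ∀ (col : Int) (data : List (List Int)), Dom_traverse_c_py col data → Pre_traverse_c_py col data → Spec_traverse_c_py col data (traverse_c_py col data)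
def Claim_changed_traverse_c_py : Prop := Dom_traverse_c_py (pvDiffWitness_traverse_c_py.1) (pvDiffWitness_traverse_c_py.2) ∧ Pre_traverse_c_py (pvDiffWitness_traverse_c_py.1) (pvDiffWitness_traverse_c_py.2) ∧ D_traverse_c_py (pvDiffWitness_traverse_c_py.1) (pvDiffWitness_traverse_c_py.2) ∧ traverse_c_py (pvDiffWitness_traverse_c_py.1) (pvDiffWitness_traverse_c_py.2) = pvDiffWitnessOut_traverse_c_py.1 ∧ traverse_c_py_alt (pvDiffWitness_traverse_c_py.1) (pvDiffWitness_traverse_c_py.2) = pvDiffWitnessOut_traverse_c_py.2 ∧ pvDiffWitnessOut_traverse_c_py.1 ≠ pvDiffWitnessOut_traverse_c_py.2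
def Claim_exact_traverse_c_py : Prop := ∀ (col : Int) (data : List (List Int)), Dom_traverse_c_py col data → Pre_traverse_c_py col data → D_traverse_c_py col data → traverse_c_py col data ≠ traverse_c_py_alt col data

-- ===== LEMMAS AND PROOFS =====

theorem pre_iff (col : Int) (data : List (List Int)) :
    Pre_traverse_c_py col data ↔ ∀ row ∈ data, PySem.Raise.InRange row.length col := by
  simp [Pre_traverse_c_py, List.all_eq_true]

theorem d_iff (col : Int) (data : List (List Int)) :
    D_traverse_c_py col data ↔
      data.length = 1 ∧ PySem.Raise.InRange (PySem.List.pyGetD data 0 []).length col ∧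
        -1 < PySem.List.pyGetD (PySem.List.pyGetD data 0 []) col 0 := by
  simp [D_traverse_c_py, Bool.and_eq_true, and_assoc]

-- max of pvCell over the k indices a, a+1, …, a+k-1 (with the Python sentinel -1)
def rmax (col : Int) (data : List (List Int)) (a : Int) : Nat → Int
  | 0 => -1
  | k + 1 => max (pvCell col data a) (rmax col data (a + 1) k)

theorem rmax_cons (col : Int) (data : List (List Int)) (a : Int) (k : Nat) :
    rmax col data a (k + 1) = max (pvCell col data a) (rmax col data (a + 1) k) := rfl

theorem rmax_snoc (col : Int) (data : List (List Int)) (a : Int) (k : Nat) :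
    rmax col data a (k + 1) = max (rmax col data a k) (pvCell col data (a + k)) := by
  induction k generalizing a with
  | zero => simp [rmax, max_comm]
  | succ k ih =>
    rw [rmax_cons, ih, rmax_cons, ← max_assoc]
    have h : a + 1 + (k : Int) = a + ((k : Nat) + 1 : Nat) := by push_cast; ring
    rw [h]

theorem neg_one_le_rmax (col : Int) (data : List (List Int)) (a : Int) (k : Nat) :
    -1 ≤ rmax col data a k := by
  induction k generalizing a with
  | zero => simp [rmax]
  | succ k ih =>
    exact le_trans (ih (a + 1)) (le_max_right (pvCell col data a) _)

theorem le_rmax (col : Int) (data : List (List Int)) (a : Int) (k : Nat) (j : Int)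
    (h1 : a ≤ j) (h2 : j < a + k) : pvCell col data j ≤ rmax col data a k := by
  induction k generalizing a with
  | zero => omega
  | succ k ih =>
    rw [rmax_cons]
    rcases eq_or_lt_of_le h1 with rfl | h
    · exact le_max_left _ _
    · exact le_trans (ih (a + 1) (by omega) (by push_cast at h2 ⊢; omega)) (le_max_right _ _)

theorem rmax_lt_iff (col : Int) (data : List (List Int)) (a : Int) (k : Nat) (x : Int) :
    rmax col data a k < x ↔ -1 < x ∧ ∀ j, a ≤ j → j < a + k → pvCell col data j < x := by
  induction k generalizing a with
  | zero => simp [rmax]; intro h j h1 h2; omega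
  | succ k ih =>
    rw [rmax_cons, max_lt_iff, ih]
    constructor
    · rintro ⟨h1, h2, h3⟩
      refine ⟨h2, fun j hj1 hj2 => ?_⟩
      rcases eq_or_lt_of_le hj1 with rfl | h
      · exact h1
      · exact h3 j (by omega) (by push_cast at hj2 ⊢; omega)
    · rintro ⟨h1, h2⟩
      exact ⟨h2 a le_rfl (by push_cast; omega), h1,
        fun j hj1 hj2 => h2 j (by omega) (by push_cast at hj2 ⊢; omega)⟩

theorem rmax_le_iff (col : Int) (data : List (List Int)) (a : Int) (k : Nat) (x : Int) :
    rmax col data a k ≤ x ↔ -1 ≤ x ∧ ∀ j, a ≤ j → j < a + k → pvCell col data j ≤ x := by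
  induction k generalizing a with
  | zero => simp [rmax]; intro h j h1 h2; omega
  | succ k ih =>
    rw [rmax_cons, max_le_iff, ih]
    constructor
    · rintro ⟨h1, h2, h3⟩
      refine ⟨h2, fun j hj1 hj2 => ?_⟩
      rcases eq_or_lt_of_le hj1 with rfl | h
      · exact h1
      · exact h3 j (by omega) (by push_cast at hj2 ⊢; omega)
    · rintro ⟨h1, h2⟩
      exact ⟨h2 a le_rfl (by push_cast; omega), h1,
        fun j hj1 hj2 => h2 j (by omega) (by push_cast at hj2 ⊢; omega)⟩

theorem rmax_mono (col : Int) (data : List (List Int)) (a a' : Int) (k k' : Nat)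
    (h1 : a' ≤ a) (h2 : a + k ≤ a' + k') : rmax col data a k ≤ rmax col data a' k' := by
  rw [rmax_le_iff]
  exact ⟨neg_one_le_rmax _ _ _ _, fun j hj1 hj2 => le_rmax _ _ _ _ _ (by omega) (by omega)⟩

-- visibility predicates
def topVis (col : Int) (data : List (List Int)) (i : Int) : Prop :=
  0 ≤ i ∧ i < (data.length : Int) ∧ rmax col data 0 i.toNat < pvCell col data i

def botVis (col : Int) (data : List (List Int)) (i : Int) : Prop :=
  0 ≤ i ∧ i < (data.length : Int) ∧
    rmax col data (i + 1) ((data.length : Int) - (i + 1)).toNat < pvCell col data i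

def Vis (col : Int) (data : List (List Int)) (x : Int × Int) : Prop :=
  ∃ i, (topVis col data i ∨ botVis col data i) ∧ x = (i, col)

-- the A-loop invariant, stated at the head of an iteration
def InvA (col : Int) (data : List (List Int)) (b e bp ep : Int)
    (ret : PySem.Set (Int × Int)) : Prop :=
  ∃ β ε : Int,
    ((β = b ∧ ε = e + 1 ∧ b < e) ∨ (β = b + 1 ∧ ε = e + 1) ∨ (β = b ∧ ε = e)) ∧
    bp = rmax col data 0 β.toNat ∧
    ep = rmax col data ε ((data.length : Int) - ε).toNat ∧
    (∀ x : Int × Int, x ∈ ret ↔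
      (∃ i, i < β ∧ topVis col data i ∧ x = (i, col)) ∨
      (∃ i, ε ≤ i ∧ botVis col data i ∧ x = (i, col))) ∧
    (∀ k, e < k → k < (data.length : Int) → pvCell col data k ≤ bp) ∧
    (∀ k, 0 ≤ k → k < b → pvCell col data k < ep)

-- when the two pointers have met, the collected set is exactly the visible set
theorem endgameA (col : Int) (data : List (List Int)) (m bp ep : Int)
    (ret : PySem.Set (Int × Int)) (hm0 : 0 ≤ m) (hmlen : m < (data.length : Int))
    (hinv : InvA col data m m bp ep ret) :
    ∀ x, x ∈ ret ↔ Vis col data x := by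
  obtain ⟨β, ε, hcase, hbp, hep, hmem, hI4, hI5⟩ := hinv
  intro x
  rw [hmem x]
  constructor
  · rintro (⟨i, _, hv, rfl⟩ | ⟨i, _, hv, rfl⟩)
    · exact ⟨i, Or.inl hv, rfl⟩
    · exact ⟨i, Or.inr hv, rfl⟩
  · rintro ⟨i, hvis, rfl⟩
    rcases hcase with ⟨_, _, hlt⟩ | ⟨hβ, hε⟩ | ⟨hβ, hε⟩
    · omega
    · -- C2 : β = m + 1, ε = m + 1
      rcases hvis with ⟨hi0, hilen, hir⟩ | ⟨hi0, hilen, hir⟩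
      · by_cases him : i < m + 1
        · exact Or.inl ⟨i, by omega, ⟨hi0, hilen, hir⟩, rfl⟩
        · exfalso
          have h1 : pvCell col data i ≤ bp := hI4 i (by omega) hilen
          have h2 : bp ≤ rmax col data 0 i.toNat := by
            rw [hbp, hβ]; exact rmax_mono _ _ _ _ _ _ le_rfl (by omega)
          omega
      · by_cases him : i < m
        · exfalso
          have h1 : pvCell col data i < ep := hI5 i hi0 him
          have h2 : ep ≤ rmax col data (i + 1) ((data.length : Int) - (i + 1)).toNat := by
            rw [hep, hε]; exact rmax_mono _ _ _ _ _ _ (by omega) (by omega)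
          omega
        · by_cases him' : i = m
          · refine Or.inl ⟨i, by omega, ⟨hi0, hilen, ?_⟩, rfl⟩
            rw [rmax_lt_iff]
            have hn1 := neg_one_le_rmax col data (i + 1) ((data.length : Int) - (i + 1)).toNat
            refine ⟨by omega, fun j hj1 hj2 => ?_⟩
            have h1 : pvCell col data j < ep := hI5 j hj1 (by omega)
            have h2 : ep = rmax col data (i + 1) ((data.length : Int) - (i + 1)).toNat := by
              rw [hep, hε, him']
            omega
          · exact Or.inr ⟨i, by omega, ⟨hi0, hilen, hir⟩, rfl⟩
    · -- C3 : β = m, ε = m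
      rcases hvis with ⟨hi0, hilen, hir⟩ | ⟨hi0, hilen, hir⟩
      · by_cases him : i < m
        · exact Or.inl ⟨i, by omega, ⟨hi0, hilen, hir⟩, rfl⟩
        · by_cases him' : i = m
          · refine Or.inr ⟨i, by omega, ⟨hi0, hilen, ?_⟩, rfl⟩
            rw [rmax_lt_iff]
            have hn1 := neg_one_le_rmax col data 0 i.toNat
            refine ⟨by omega, fun j hj1 hj2 => ?_⟩
            have h1 : pvCell col data j ≤ bp := hI4 j (by omega) (by omega)
            have h2 : bp = rmax col data 0 i.toNat := by rw [hbp, hβ, him']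
            omega
          · exfalso
            have h1 : pvCell col data i ≤ bp := hI4 i (by omega) hilen
            have h2 : bp ≤ rmax col data 0 i.toNat := by
              rw [hbp, hβ]; exact rmax_mono _ _ _ _ _ _ le_rfl (by omega)
            omega
      · by_cases him : i < m
        · exfalso
          have h1 : pvCell col data i < ep := hI5 i hi0 him
          have h2 : ep ≤ rmax col data (i + 1) ((data.length : Int) - (i + 1)).toNat := by
            rw [hep, hε]; exact rmax_mono _ _ _ _ _ _ (by omega) (by omega)
          omega
        · exact Or.inr ⟨i, by omega, ⟨hi0, hilen, hir⟩, rfl⟩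

-- the begin-side running-maximum update
theorem prefix_step_val (col : Int) (data : List (List Int)) (b β : Int) (hb0 : 0 ≤ b)
    (hβ : β = b ∨ β = b + 1) :
    (if rmax col data 0 β.toNat < pvCell col data b then pvCell col data b
      else rmax col data 0 β.toNat) = rmax col data 0 (b + 1).toNat := by
  have hsnoc : rmax col data 0 (b + 1).toNat
      = max (rmax col data 0 b.toNat) (pvCell col data b) := by
    rw [show (b + 1).toNat = b.toNat + 1 by omega, rmax_snoc]
    have h : (0 : Int) + (b.toNat : Int) = b := by omega
    rw [h]
  rcases hβ with h' | h'
  · rw [h']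
    by_cases h : rmax col data 0 b.toNat < pvCell col data b
    · rw [if_pos h, hsnoc, max_eq_right h.le]
    · rw [if_neg h, hsnoc, max_eq_left (not_lt.mp h)]
  · rw [h']
    have hle : pvCell col data b ≤ rmax col data 0 (b + 1).toNat :=
      le_rmax _ _ _ _ _ hb0 (by omega)
    rw [if_neg (not_lt.mpr hle)]

-- the end-side running-maximum update
theorem suffix_step_val (col : Int) (data : List (List Int)) (e ε : Int)
    (helen : e < (data.length : Int)) (hε : ε = e ∨ ε = e + 1) :
    (if rmax col data ε ((data.length : Int) - ε).toNat < pvCell col data e then pvCell col data e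
      else rmax col data ε ((data.length : Int) - ε).toNat)
      = rmax col data e ((data.length : Int) - e).toNat := by
  have hcons : rmax col data e ((data.length : Int) - e).toNat
      = max (pvCell col data e) (rmax col data (e + 1) ((data.length : Int) - (e + 1)).toNat) := by
    rw [show ((data.length : Int) - e).toNat = ((data.length : Int) - (e + 1)).toNat + 1 by omega,
      rmax_cons]
  rcases hε with h' | h'
  · rw [h']
    have hle : pvCell col data e ≤ rmax col data e ((data.length : Int) - e).toNat :=
      le_rmax _ _ _ _ _ le_rfl (by omega)
    rw [if_neg (not_lt.mpr hle)]
  · rw [h']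
    by_cases h : rmax col data (e + 1) ((data.length : Int) - (e + 1)).toNat < pvCell col data e
    · rw [if_pos h, hcons, max_eq_left h.le]
    · rw [if_neg h, hcons, max_eq_right (not_lt.mp h)]

-- the main loop lemma: under the invariant, the loop collects exactly the visible trees
theorem loopA_mem (col : Int) (data : List (List Int)) :
    ∀ (fuel : Nat) (b e bp ep : Int) (ret : PySem.Set (Int × Int)),
    (e - b).toNat ≤ fuel → 0 ≤ b → b ≤ e → e < (data.length : Int) →
    InvA col data b e bp ep ret →
    ∀ x : Int × Int, x ∈ tcLoopA col data fuel b e bp ep ret ↔ Vis col data x := by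
  intro fuel
  induction fuel with
  | zero =>
    intro b e bp ep ret hf hb0 hbe helen hinv x
    have hbe' : b = e := by omega
    subst hbe'
    exact endgameA col data b bp ep ret hb0 helen hinv x
  | succ fuel ih =>
    intro b e bp ep ret hf hb0 hbe helen hinv x
    by_cases hlt : b < e
    · obtain ⟨β, ε, hcase, hbp, hep, hmem, hI4, hI5⟩ := hinv
      have hβr : β = b ∨ β = b + 1 := by
        rcases hcase with ⟨h, _, _⟩ | ⟨h, _⟩ | ⟨h, _⟩ <;> omega
      have hεr : ε = e ∨ ε = e + 1 := by
        rcases hcase with ⟨_, h, _⟩ | ⟨_, h⟩ | ⟨_, h⟩ <;> omega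
      have hble : b < (data.length : Int) := by omega
      have hbval : (if bp < pvCell col data b then pvCell col data b else bp)
          = rmax col data 0 (b + 1).toNat := by
        rw [hbp]; exact prefix_step_val col data b β hb0 hβr
      have heval : (if ep < pvCell col data e then pvCell col data e else ep)
          = rmax col data e ((data.length : Int) - e).toNat := by
        rw [hep]; exact suffix_step_val col data e ε helen hεr
      have hmem1 : ∀ y : Int × Int,
          y ∈ (if bp < pvCell col data b then PySem.Set.add ret (b, col) else ret) ↔
          (∃ i, i < b + 1 ∧ topVis col data i ∧ y = (i, col)) ∨
          (∃ i, ε ≤ i ∧ botVis col data i ∧ y = (i, col)) := by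
        intro y
        by_cases hc : bp < pvCell col data b
        · rw [if_pos hc, PySem.Set.mem_add, hmem y]
          have hβb : β = b := by
            rcases hβr with h | h
            · exact h
            · exfalso
              rw [hbp, h] at hc
              exact absurd hc (not_lt.mpr (le_rmax _ _ _ _ _ hb0 (by omega)))
          have htop : topVis col data b :=
            ⟨hb0, hble, by rw [hbp, hβb] at hc; exact hc⟩
          constructor
          · rintro ((⟨i, h1, h2, rfl⟩ | h) | rfl)
            · exact Or.inl ⟨i, by omega, h2, rfl⟩
            · exact Or.inr h
            · exact Or.inl ⟨b, by omega, htop, rfl⟩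
          · rintro (⟨i, h1, h2, rfl⟩ | h)
            · rcases eq_or_lt_of_le (show i ≤ b by omega) with heq | hib
              · exact Or.inr (by rw [heq])
              · exact Or.inl (Or.inl ⟨i, by omega, h2, rfl⟩)
            · exact Or.inl (Or.inr h)
        · rw [if_neg hc, hmem y]
          constructor
          · rintro (⟨i, h1, h2, rfl⟩ | h)
            · exact Or.inl ⟨i, by omega, h2, rfl⟩
            · exact Or.inr h
          · rintro (⟨i, h1, h2, rfl⟩ | h)
            · rcases eq_or_lt_of_le (show i ≤ b by omega) with rfl | hib
              · rcases hβr with h | h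
                · exfalso
                  obtain ⟨_, _, h3⟩ := h2
                  rw [hbp, h] at hc
                  exact hc h3
                · exact Or.inl ⟨i, by omega, h2, rfl⟩
              · exact Or.inl ⟨i, by omega, h2, rfl⟩
            · exact Or.inr h
      have hmem2 : ∀ y : Int × Int,
          y ∈ (if ep < pvCell col data e
              then PySem.Set.add
                (if bp < pvCell col data b then PySem.Set.add ret (b, col) else ret) (e, col)
              else (if bp < pvCell col data b then PySem.Set.add ret (b, col) else ret)) ↔
          (∃ i, i < b + 1 ∧ topVis col data i ∧ y = (i, col)) ∨
          (∃ i, e ≤ i ∧ botVis col data i ∧ y = (i, col)) := by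
        intro y
        by_cases hc : ep < pvCell col data e
        · rw [if_pos hc, PySem.Set.mem_add, hmem1 y]
          have hεe : ε = e + 1 := by
            rcases hεr with h | h
            · exfalso
              rw [hep, h] at hc
              exact absurd hc (not_lt.mpr (le_rmax _ _ _ _ _ le_rfl (by omega)))
            · exact h
          have hbot : botVis col data e :=
            ⟨by omega, helen, by rw [hep, hεe] at hc; exact hc⟩
          constructor
          · rintro ((h | ⟨i, h1, h2, rfl⟩) | rfl)
            · exact Or.inl h
            · exact Or.inr ⟨i, by omega, h2, rfl⟩
            · exact Or.inr ⟨e, le_rfl, hbot, rfl⟩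
          · rintro (h | ⟨i, h1, h2, rfl⟩)
            · exact Or.inl (Or.inl h)
            · rcases eq_or_lt_of_le h1 with heq | hie
              · exact Or.inr (by rw [← heq])
              · exact Or.inl (Or.inr ⟨i, by omega, h2, rfl⟩)
        · rw [if_neg hc, hmem1 y]
          constructor
          · rintro (h | ⟨i, h1, h2, rfl⟩)
            · exact Or.inl h
            · exact Or.inr ⟨i, by omega, h2, rfl⟩
          · rintro (h | ⟨i, h1, h2, rfl⟩)
            · exact Or.inl h
            · rcases eq_or_lt_of_le h1 with heq | hie
              · rcases hεr with h | h
                · exact Or.inr ⟨i, by omega, h2, rfl⟩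
                · exfalso
                  obtain ⟨_, _, h3⟩ := h2
                  rw [hep, h] at hc
                  rw [heq] at hc
                  exact hc h3
              · exact Or.inr ⟨i, by omega, h2, rfl⟩
      simp only [tcLoopA, if_pos hlt]
      by_cases hd : pvCell col data e ≤ pvCell col data b
      · rw [if_pos hd]
        apply ih b (e - 1) _ _ _ (by omega) hb0 (by omega) (by omega) _ x
        refine ⟨b + 1, e, Or.inr (Or.inl ⟨rfl, by omega⟩), hbval, ?_, hmem2, ?_, ?_⟩
        · exact heval
        · intro k hk1 hk2
          rw [hbval]
          rcases eq_or_lt_of_le (show e ≤ k by omega) with rfl | hk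
          · exact le_trans hd (le_rmax _ _ _ _ _ hb0 (by omega))
          · refine le_trans (hI4 k hk hk2) ?_
            rw [hbp]
            exact rmax_mono _ _ _ _ _ _ le_rfl (by omega)
        · intro k hk0 hkb
          rw [heval]
          refine lt_of_lt_of_le (hI5 k hk0 hkb) ?_
          rw [hep]
          exact rmax_mono _ _ _ _ _ _ (by omega) (by omega)
      · rw [if_neg hd]
        apply ih (b + 1) e _ _ _ (by omega) (by omega) (by omega) helen _ x
        refine ⟨b + 1, e, Or.inr (Or.inr ⟨rfl, rfl⟩), hbval, heval, hmem2, ?_, ?_⟩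
        · intro k hk1 hk2
          rw [hbval]
          refine le_trans (hI4 k hk1 hk2) ?_
          rw [hbp]
          exact rmax_mono _ _ _ _ _ _ le_rfl (by omega)
        · intro k hk0 hkb
          rw [heval]
          rcases eq_or_lt_of_le (show k ≤ b by omega) with rfl | hkb'
          · exact lt_of_lt_of_le (not_le.mp hd) (le_rmax _ _ _ _ _ le_rfl (by omega))
          · refine lt_of_lt_of_le (hI5 k hk0 hkb') ?_
            rw [hep]
            exact rmax_mono _ _ _ _ _ _ (by omega) (by omega)
    · have hbe' : b = e := by omega
      subst hbe'
      simp only [tcLoopA, if_neg hlt]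
      exact endgameA col data b bp ep ret hb0 helen hinv x

-- B-side: the forward sweep collects exactly the top-visible trees
theorem sweepB_fwd_mem (col : Int) (data : List (List Int)) (x : Int × Int) :
    ∀ (d m : Nat) (s : PySem.Set (Int × Int)), m + d = data.length →
    (x ∈ (sweepB col data (PySem.List.pyRange (m : Int) (data.length : Int) 1)
        (s, rmax col data 0 m)).1 ↔
      x ∈ s ∨ ∃ i : Int, (m : Int) ≤ i ∧ topVis col data i ∧ x = (i, col)) := by
  intro d
  induction d with
  | zero =>
    intro m s hm
    have h0 : PySem.List.pyRange (m : Int) (data.length : Int) 1 = [] := by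
      apply PySem.List.pyRange_one_eq_nil
      omega
    rw [h0]
    simp only [sweepB, List.foldl_nil]
    constructor
    · exact Or.inl
    · rintro (h | ⟨i, hi, ⟨_, hilen, _⟩, _⟩)
      · exact h
      · omega
  | succ d ih =>
    intro m s hm
    have hmlt : (m : Int) < (data.length : Int) := by omega
    rw [PySem.List.pyRange_one_cons hmlt]
    simp only [sweepB, List.foldl_cons] at ih ⊢
    have hsucc : ((m : Int) + 1) = ((m + 1 : Nat) : Int) := by push_cast; ring
    by_cases hv : rmax col data 0 m < pvCell col data (m : Int)
    · rw [if_pos hv]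
      have htop : topVis col data (m : Int) := by
        refine ⟨by omega, hmlt, ?_⟩
        rw [show ((m : Int)).toNat = m by omega]
        exact hv
      have hst : pvCell col data (m : Int) = rmax col data 0 (m + 1) := by
        rw [rmax_snoc, show (0 : Int) + (m : Nat) = (m : Int) by omega,
          max_eq_right hv.le]
      rw [hst, hsucc, ih (m + 1) (PySem.Set.add s ((m : Int), col)) (by omega),
        PySem.Set.mem_add]
      constructor
      · rintro ((h | rfl) | ⟨i, hi, h2, rfl⟩)
        · exact Or.inl h
        · exact Or.inr ⟨(m : Int), le_rfl, htop, rfl⟩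
        · exact Or.inr ⟨i, by omega, h2, rfl⟩
      · rintro (h | ⟨i, hi, h2, rfl⟩)
        · exact Or.inl (Or.inl h)
        · rcases eq_or_lt_of_le hi with heq | hi'
          · exact Or.inl (Or.inr (by rw [← heq]))
          · exact Or.inr ⟨i, by omega, h2, rfl⟩
    · rw [if_neg hv]
      have hst : rmax col data 0 m = rmax col data 0 (m + 1) := by
        rw [rmax_snoc, show (0 : Int) + (m : Nat) = (m : Int) by omega,
          max_eq_left (not_lt.mp hv)]
      rw [hst, hsucc, ih (m + 1) s (by omega)]
      constructor
      · rintro (h | ⟨i, hi, h2, rfl⟩)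
        · exact Or.inl h
        · exact Or.inr ⟨i, by omega, h2, rfl⟩
      · rintro (h | ⟨i, hi, h2, rfl⟩)
        · exact Or.inl h
        · rcases eq_or_lt_of_le hi with heq | hi'
          · exfalso
            obtain ⟨_, _, h3⟩ := h2
            rw [← heq] at h3
            rw [show (((m : Nat) : Int)).toNat = m by omega] at h3
            exact hv h3
          · exact Or.inr ⟨i, by omega, h2, rfl⟩

-- B-side: the backward sweep collects exactly the bottom-visible trees
theorem sweepB_bwd_mem (col : Int) (data : List (List Int)) (x : Int × Int) :
    ∀ (m : Nat) (s : PySem.Set (Int × Int)), m ≤ data.length →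
    (x ∈ (sweepB col data (PySem.List.pyRange ((m : Int) - 1) (-1) (-1))
        (s, rmax col data (m : Int) (data.length - m))).1 ↔
      x ∈ s ∨ ∃ i : Int, i < (m : Int) ∧ botVis col data i ∧ x = (i, col)) := by
  intro m
  induction m with
  | zero =>
    intro s _
    have h0 : PySem.List.pyRange ((((0 : Nat)) : Int) - 1) (-1) (-1) = [] := by
      apply PySem.List.pyRange_neg_one_eq_nil
      omega
    rw [h0]
    simp only [sweepB, List.foldl_nil]
    constructor
    · exact Or.inl
    · rintro (h | ⟨i, hi, ⟨hi0, _, _⟩, _⟩)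
      · exact h
      · omega
  | succ m ih =>
    intro s hm
    have hstep : ((m + 1 : Nat) : Int) - 1 = (m : Int) := by push_cast; ring
    rw [hstep, PySem.List.pyRange_neg_one_cons (by omega)]
    simp only [sweepB, List.foldl_cons] at ih ⊢
    have hcnt : data.length - (m + 1) + 1 = data.length - m := by omega
    have hcast : ((m + 1 : Nat) : Int) = (m : Int) + 1 := by push_cast; ring
    have hbotiff : (rmax col data ((m + 1 : Nat) : Int) (data.length - (m + 1))
        < pvCell col data (m : Int)) ↔ botVis col data (m : Int) := by
      constructor
      · intro h
        refine ⟨by omega, by omega, ?_⟩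
        rw [show ((data.length : Int) - ((m : Int) + 1)).toNat = data.length - (m + 1) by omega,
          ← hcast]
        exact h
      · rintro ⟨_, _, h3⟩
        rw [show ((data.length : Int) - ((m : Int) + 1)).toNat = data.length - (m + 1) by omega]
          at h3
        rw [hcast]
        exact h3
    have hfront : rmax col data (m : Int) (data.length - m)
        = max (pvCell col data (m : Int))
            (rmax col data ((m : Int) + 1) (data.length - (m + 1))) := by
      rw [← hcnt, rmax_cons]
    by_cases hv : rmax col data ((m + 1 : Nat) : Int) (data.length - (m + 1))
        < pvCell col data (m : Int)
    · rw [if_pos hv]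
      have hbot : botVis col data (m : Int) := hbotiff.mp hv
      have hst : pvCell col data (m : Int) = rmax col data (m : Int) (data.length - m) := by
        rw [hfront, ← hcast, max_eq_left hv.le]
      rw [hst, ih (PySem.Set.add s ((m : Int), col)) (by omega), PySem.Set.mem_add]
      constructor
      · rintro ((h | rfl) | ⟨i, hi, h2, rfl⟩)
        · exact Or.inl h
        · exact Or.inr ⟨(m : Int), by omega, hbot, rfl⟩
        · exact Or.inr ⟨i, by omega, h2, rfl⟩
      · rintro (h | ⟨i, hi, h2, rfl⟩)
        · exact Or.inl (Or.inl h)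
        · rcases eq_or_lt_of_le (show i ≤ (m : Int) by omega) with heq | hi'
          · exact Or.inl (Or.inr (by rw [heq]))
          · exact Or.inr ⟨i, by omega, h2, rfl⟩
    · rw [if_neg hv]
      have hst : rmax col data ((m + 1 : Nat) : Int) (data.length - (m + 1))
          = rmax col data (m : Int) (data.length - m) := by
        rw [hfront, ← hcast, max_eq_right (not_lt.mp hv)]
      rw [hst, ih s (by omega)]
      constructor
      · rintro (h | ⟨i, hi, h2, rfl⟩)
        · exact Or.inl h
        · exact Or.inr ⟨i, by omega, h2, rfl⟩
      · rintro (h | ⟨i, hi, h2, rfl⟩)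
        · exact Or.inl h
        · rcases eq_or_lt_of_le (show i ≤ (m : Int) by omega) with rfl | hi'
          · exact absurd (hbotiff.mpr h2) hv
          · exact Or.inr ⟨i, by omega, h2, rfl⟩

-- Nodup preservation
theorem tcLoopA_nodup (col : Int) (data : List (List Int)) :
    ∀ (fuel : Nat) (b e bp ep : Int) (ret : PySem.Set (Int × Int)),
    ret.Nodup → (tcLoopA col data fuel b e bp ep ret).Nodup := by
  intro fuel
  induction fuel with
  | zero => intro b e bp ep ret h; exact h
  | succ fuel ih =>
    intro b e bp ep ret h
    simp only [tcLoopA]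
    by_cases hlt : b < e
    · rw [if_pos hlt]
      have h1 : (if bp < pvCell col data b then PySem.Set.add ret (b, col) else ret).Nodup := by
        by_cases hc : bp < pvCell col data b
        · rw [if_pos hc]; exact PySem.Set.nodup_add _ _ h
        · rw [if_neg hc]; exact h
      have h2 : (if ep < pvCell col data e
          then PySem.Set.add
            (if bp < pvCell col data b then PySem.Set.add ret (b, col) else ret) (e, col)
          else (if bp < pvCell col data b then PySem.Set.add ret (b, col) else ret)).Nodup := by
        by_cases hc : ep < pvCell col data e
        · rw [if_pos hc]; exact PySem.Set.nodup_add _ _ h1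
        · rw [if_neg hc]; exact h1
      by_cases hd : pvCell col data e ≤ pvCell col data b
      · rw [if_pos hd]; exact ih _ _ _ _ _ h2
      · rw [if_neg hd]; exact ih _ _ _ _ _ h2
    · rw [if_neg hlt]; exact h

theorem sweepB_nodup (col : Int) (data : List (List Int)) (idxs : List Int) :
    ∀ st : PySem.Set (Int × Int) × Int, st.1.Nodup → (sweepB col data idxs st).1.Nodup := by
  induction idxs with
  | nil => intro st h; exact h
  | cons i rest ih =>
    intro st h
    simp only [sweepB, List.foldl_cons] at ih ⊢
    by_cases hc : st.2 < pvCell col data i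
    · rw [if_pos hc]
      exact ih _ (PySem.Set.nodup_add _ _ h)
    · rw [if_neg hc]
      exact ih _ h

-- the two raw sets agree (as sets) whenever data has at least two rows
theorem rawA_mem (col : Int) (data : List (List Int)) (h2 : 2 ≤ data.length) :
    ∀ x : Int × Int,
      x ∈ tcLoopA col data data.length 0 ((data.length : Int) - 1) (-1) (-1) PySem.Set.empty ↔
        Vis col data x := by
  intro x
  apply loopA_mem col data data.length 0 ((data.length : Int) - 1) (-1) (-1) PySem.Set.empty
    (by omega) le_rfl (by omega) (by omega)
  refine ⟨0, (data.length : Int), Or.inl ⟨rfl, by omega, by omega⟩, rfl, ?_, ?_, ?_, ?_⟩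
  · rw [show ((data.length : Int) - (data.length : Int)).toNat = 0 by omega]
    rfl
  · intro y
    simp only [PySem.Set.empty]
    constructor
    · intro h
      exact absurd h (List.not_mem_nil)
    · rintro (⟨i, h1, ⟨hi0, _, _⟩, rfl⟩ | ⟨i, h1, ⟨_, hilen, _⟩, rfl⟩) <;> omega
  · intro k h1 h2'
    omega
  · intro k h1 h2'
    omega

theorem rawB_mem (col : Int) (data : List (List Int)) :
    ∀ x : Int × Int,
      x ∈ (sweepB col data (PySem.List.pyRange ((data.length : Int) - 1) (-1) (-1))
          ((sweepB col data (PySem.List.pyRange 0 (data.length : Int) 1)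
            (PySem.Set.empty, -1)).1, -1)).1 ↔ Vis col data x := by
  intro x
  have hfwd := sweepB_fwd_mem col data x data.length 0 PySem.Set.empty (by omega)
  rw [show ((0 : Nat) : Int) = (0 : Int) by rfl] at hfwd
  have hr0 : rmax col data 0 0 = -1 := rfl
  rw [hr0] at hfwd
  have hbwd := sweepB_bwd_mem col data x data.length
    ((sweepB col data (PySem.List.pyRange 0 (data.length : Int) 1) (PySem.Set.empty, -1)).1)
    le_rfl
  rw [show data.length - data.length = 0 by omega] at hbwd
  have hr1 : rmax col data (data.length : Int) 0 = -1 := rfl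
  rw [hr1] at hbwd
  rw [hbwd, hfwd]
  constructor
  · rintro ((h | ⟨i, _, h2, rfl⟩) | ⟨i, _, h2, rfl⟩)
    · exact absurd h (List.not_mem_nil)
    · exact ⟨i, Or.inl h2, rfl⟩
    · exact ⟨i, Or.inr h2, rfl⟩
  · rintro ⟨i, (h | h), rfl⟩
    · exact Or.inl (Or.inr ⟨i, h.1, h, rfl⟩)
    · exact Or.inr ⟨i, by have := h.2.1; omega, h, rfl⟩

-- visible pairs carry the column in the second component
theorem vis_snd (col : Int) (data : List (List Int)) (x : Int × Int)
    (h : Vis col data x) : x.2 = col := by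
  obtain ⟨i, _, rfl⟩ := h
  rfl

-- canonical sorted form of two nodup lists with equal membership and constant snd
theorem sorted_canon (col : Int) (xs ys : List (Int × Int))
    (hxs : xs.Nodup) (hys : ys.Nodup)
    (hmem : ∀ x : Int × Int, x ∈ xs ↔ x ∈ ys)
    (hcol : ∀ x : Int × Int, x ∈ xs → x.2 = col) :
    PySem.List.sorted xs (fun x => x.1) false = PySem.List.sorted ys (fun x => x.1) false := by
  have hperm : ys.Perm xs := by
    rw [List.perm_ext_iff_of_nodup hys hxs]
    intro a
    exact (hmem a).symm
  apply PySem.List.sorted_eq_of_perm_of_pairwise_lt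
  · exact (PySem.List.sorted_perm ys (fun x => x.1) false).trans hperm
  · have hle : (PySem.List.sorted ys (fun x => x.1) false).Pairwise
        (fun a b : Int × Int => a.1 ≤ b.1) := PySem.List.sorted_pairwise ys (fun x => x.1)
    have hnd : (PySem.List.sorted ys (fun x => x.1) false).Nodup :=
      ((PySem.List.sorted_perm ys (fun x => x.1) false).nodup_iff).mpr hys
    have hco : ∀ x : Int × Int, x ∈ PySem.List.sorted ys (fun x => x.1) false → x.2 = col := by
      intro x hx
      rw [PySem.List.mem_sorted] at hx
      exact hcol x ((hmem x).mpr hx)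
    have hand := List.Pairwise.and hle hnd
    refine hand.imp_of_mem ?_
    intro a b ha hb hab
    obtain ⟨h1, h2⟩ := hab
    rcases eq_or_lt_of_le h1 with heq | hlt
    · exfalso
      apply h2
      have := hco a ha
      have := hco b hb
      exact Prod.ext heq (by omega)
    · exact hlt

-- small grids, computed directly
theorem small_eq (col : Int) (data : List (List Int)) (hpre : Pre_traverse_c_py col data)
    (hnd : ¬ D_traverse_c_py col data) (hlen : data.length ≤ 1) :
    traverse_c_py col data = traverse_c_py_alt col data := by
  match data, hlen with
  | [], _ =>
    rfl
  | [row], _ =>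
    have hcell : pvCell col [row] 0 ≤ -1 := by
      by_contra hgt
      refine hnd ((d_iff col [row]).mpr ⟨rfl, (pre_iff col [row]).mp hpre row (by simp), ?_⟩)
      unfold pvCell at hgt
      omega
    have hc' : ¬ ((-1 : Int) < pvCell col [row] 0) := not_lt.mpr hcell
    have e1 : PySem.List.pyRange 0 (1 : Int) 1 = [0] := by decide
    have e2 : PySem.List.pyRange ((1 : Int) - 1) (-1) (-1) = [0] := by decide
    have e3 : PySem.List.pyRange (0 : Int) (-1) (-1) = [0] := by decide
    have hA : traverse_c_py col [row] = [] := by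
      unfold traverse_c_py
      norm_num [tcLoopA, PySem.List.sorted_eq_nil_iff]
    have hB : traverse_c_py_alt col [row] = [] := by
      unfold traverse_c_py_alt
      norm_num [sweepB, e1, e2, e3, hc', PySem.List.sorted_eq_nil_iff]
    rw [hA, hB]

theorem main_eq (col : Int) (data : List (List Int)) (hpre : Pre_traverse_c_py col data)
    (hnd : ¬ D_traverse_c_py col data) :
    traverse_c_py col data = traverse_c_py_alt col data := by
  by_cases hlen : data.length ≤ 1
  · exact small_eq col data hpre hnd hlen
  · unfold traverse_c_py traverse_c_py_alt
    apply sorted_canon col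
    · apply tcLoopA_nodup
      exact List.nodup_nil
    · apply sweepB_nodup
      apply sweepB_nodup
      exact List.nodup_nil
    · intro x
      rw [rawA_mem col data (by omega) x, rawB_mem col data x]
    · intro x hx
      exact vis_snd col data x ((rawA_mem col data (by omega) x).mp hx)

-- ===== VERDICT (by name: the statement is the Claim_ definition above) =====
theorem traverse_c_py_spec : Claim_unchanged_traverse_c_py := by
  intro col data _ hpre hnd
  exact main_eq col data hpre hnd

theorem traverse_c_py_changed : Claim_changed_traverse_c_py := by
  unfold Claim_changed_traverse_c_py; decide

theorem traverse_c_py_tight : Claim_exact_traverse_c_py := by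
  intro col data _ hpre hd
  obtain ⟨hlen1, -, hcell⟩ := (d_iff col data).mp hd
  obtain ⟨row, rfl⟩ := List.length_eq_one_iff.mp hlen1
  have hA : traverse_c_py col [row] = [] := by
    unfold traverse_c_py
    norm_num [tcLoopA, PySem.List.sorted_eq_nil_iff]
  have hB : (0, col) ∈ traverse_c_py_alt col [row] := by
    unfold traverse_c_py_alt
    rw [PySem.List.mem_sorted]
    refine (rawB_mem col [row] (0, col)).mpr ⟨0, Or.inl ⟨le_rfl, by norm_num, ?_⟩, rfl⟩
    exact hcell
  intro heq
  rw [hA] at heq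
  rw [← heq] at hB
  exact absurd hB (List.not_mem_nil)
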